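-- pv_equiv track=rewrite | github.com/NickMusk/tener-ai-v1 | src/tener_ai/auth/service.py | _has_any_scope
-- ===== SOURCE A (Python) =====
-- from typing import List, Optional, Sequence
--
-- def _has_any_scope(granted: List[str], required: Sequence[str]) -> bool:
--     granted_norm = [str(x).strip().lower() for x in granted if str(x).strip()]
--     if "*" in granted_norm:
--         return True
--     for need in required:
--         wanted = str(need).strip().lower()
--         if not wanted:
--             continue
--         if wanted in granted_norm:
--             return True
--         if ":" in wanted:
--             prefix = wanted.split(":", 1)[0]
--             if f"{prefix}:*" in granted_norm:
--                 return True
--     return False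
-- ===== SOURCE B (Python) =====
-- def _has_any_scope(granted, required):
--     # Invert A's traversal: index the required side once (exact needs and the
--     # first segments of colon-bearing needs), then scan granted a single time,
--     # asking for each grant entry whether it satisfies some need.
--     needs = set()
--     need_prefixes = set()
--     for x in required:
--         w = str(x).strip().lower()
--         if w:
--             needs.add(w)
--             if ":" in w:
--                 need_prefixes.add(w.split(":", 1)[0])
--     for x in granted:
--         e = str(x).strip().lower()
--         if e == "*":
--             return True
--         if e in needs:
--             return True
--         if e.endswith(":*") and e[:-2] in need_prefixes:
--             return True
--     return False
-- ===== Notes on version B (the rewrite author's own statement) =====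
-- stated objective: alternative
-- what changed: B inverts the traversal: it indexes the required side once (a set of normalized needs and a set of first segments of colon-bearing needs) and then makes a single early-exit pass over granted, asking for each grant entry whether it is '*', an exact need, or a ':*' wildcard whose prefix some need starts with; A instead loops over required and scans the granted list per need.
import Mathlib
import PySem

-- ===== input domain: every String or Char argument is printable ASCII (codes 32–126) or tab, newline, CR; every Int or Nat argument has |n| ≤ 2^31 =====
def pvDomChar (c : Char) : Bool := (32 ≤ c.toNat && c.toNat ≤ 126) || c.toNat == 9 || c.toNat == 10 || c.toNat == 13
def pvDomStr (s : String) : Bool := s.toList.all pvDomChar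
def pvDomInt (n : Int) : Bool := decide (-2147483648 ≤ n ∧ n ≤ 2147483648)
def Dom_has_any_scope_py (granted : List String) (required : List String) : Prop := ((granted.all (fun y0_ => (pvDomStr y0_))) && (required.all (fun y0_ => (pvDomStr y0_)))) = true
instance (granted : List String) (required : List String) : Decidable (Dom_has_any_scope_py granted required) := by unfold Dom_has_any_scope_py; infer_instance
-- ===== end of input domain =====

set_option maxHeartbeats 400000

-- B inverts A's traversal: it indexes the required side once (exact needs and the
-- first segments of colon-bearing needs) and then scans granted a single time;
-- alternative decomposition, not claimed faster.

-- shared helpers: the normalization str(x).strip().lower() and w.split(":", 1)[0] (both Pythons use these expressions)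
def pyNorm (x : String) : String := PySem.Str.lower (PySem.Str.strip x)

def pyFirstSeg (w : String) : String :=
  match PySem.Str.splitMax? w ":" 1 with
  | some (p :: _) => p
  | _ => w  -- unreachable: split with a non-empty separator is a non-empty list

-- ===== PORT A =====
def hasScopeLoop (gn : List String) : List String → Bool
  | [] => false
  | need :: rest =>
    let wanted := pyNorm need
    if wanted == "" then hasScopeLoop gn rest
    else if gn.contains wanted then true
    else if PySem.Str.isIn ":" wanted then
      (if gn.contains (pyFirstSeg wanted ++ ":*") then true else hasScopeLoop gn rest)
    else hasScopeLoop gn rest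

def has_any_scope_py (granted : List String) (required : List String) : Bool :=
  let granted_norm := (granted.filter (fun x => !(PySem.Str.strip x == ""))).map pyNorm
  if granted_norm.contains "*" then true
  else hasScopeLoop granted_norm required

-- ===== PORT B =====
-- B's first loop: build the set of normalized needs and the set of first segments of colon-bearing needs
def buildStep (acc : PySem.Set String × PySem.Set String) (x : String) :
    PySem.Set String × PySem.Set String :=
  let w := pyNorm x
  if w == "" then acc
  else if PySem.Str.isIn ":" w then
    (PySem.Set.add acc.1 w, PySem.Set.add acc.2 (pyFirstSeg w))
  else (PySem.Set.add acc.1 w, acc.2)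

def buildNeeds (required : List String) : PySem.Set String × PySem.Set String :=
  required.foldl buildStep ([], [])

-- B's second loop: early-exit scan over granted
def grantLoop (needs prefixes : PySem.Set String) : List String → Bool
  | [] => false
  | x :: rest =>
    let e := pyNorm x
    if e == "*" then true
    else if PySem.Set.contains needs e then true
    else if PySem.Str.endswith e ":*" &&
            PySem.Set.contains prefixes (PySem.Str.slice e none (some (-2))) then true
    else grantLoop needs prefixes rest

def has_any_scope_py_alt (granted : List String) (required : List String) : Bool :=
  let np := buildNeeds required
  grantLoop np.1 np.2 granted

-- ===== PRECONDITION & SPEC =====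
def Spec_has_any_scope_py (granted : List String) (required : List String) (out : Bool) : Prop := out = has_any_scope_py_alt granted required
instance (granted : List String) (required : List String) (out : Bool) : Decidable (Spec_has_any_scope_py granted required out) := by unfold Spec_has_any_scope_py; infer_instance

-- ===== CLAIM (what is proved, stated in full; the proofs are below) =====
def Claim_equal_has_any_scope_py : Prop := ∀ (granted : List String) (required : List String), Dom_has_any_scope_py granted required → Spec_has_any_scope_py granted required (has_any_scope_py granted required)

-- ===== LEMMAS AND PROOFS =====

-- the common meaning both programs compute: some grant entry satisfies some need (or is '*')
def MatchScope (granted required : List String) : Prop :=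
  (∃ x ∈ granted, pyNorm x = "*") ∨
  ∃ r ∈ required, pyNorm r ≠ "" ∧
    ((∃ x ∈ granted, pyNorm x = pyNorm r) ∨
     (PySem.Str.isIn ":" (pyNorm r) = true ∧
      ∃ x ∈ granted, pyNorm x = pyFirstSeg (pyNorm r) ++ ":*"))

theorem pyNorm_eq_empty_iff (x : String) : pyNorm x = "" ↔ PySem.Str.strip x = "" := by
  rw [← String.toList_inj, ← String.toList_inj (s₁ := PySem.Str.strip x)]
  simp only [pyNorm, PySem.Str.toList_lower, PySem.Str.toList_strip, PySem.Chars.lower]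
  simp [List.map_eq_nil_iff]

theorem append_star_ne_empty (p : String) : p ++ ":*" ≠ "" := by
  intro h
  have := congrArg String.toList h
  simp at this

theorem endswith_star_iff (e : String) :
    PySem.Str.endswith e ":*" = true ↔ ∃ p, e = p ++ ":*" := by
  rw [PySem.Str.endswith_eq, PySem.Chars.endswith_iff]
  constructor
  · rintro ⟨l, hl⟩
    refine ⟨String.ofList l, ?_⟩
    rw [← String.toList_inj]
    simp [← hl]
  · rintro ⟨p, rfl⟩
    exact ⟨p.toList, by simp⟩

theorem slice_star (p : String) :
    PySem.Str.slice (p ++ ":*") none (some (-2)) = p := by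
  rw [← String.toList_inj]
  rw [PySem.Str.toList_slice]
  simp only [PySem.Chars.slice_eq_listSlice]
  rw [PySem.List.slice_to_neg_ofNat _ 2 (by omega)]
  simp

-- membership in A's normalized granted list
theorem mem_gn (granted : List String) (w : String) :
    w ∈ (granted.filter (fun x => !(PySem.Str.strip x == ""))).map pyNorm ↔
      ∃ x ∈ granted, ¬ PySem.Str.strip x = "" ∧ pyNorm x = w := by
  simp [List.mem_map, List.mem_filter, and_assoc]

theorem mem_gn_of_ne (granted : List String) (w : String) (hw : w ≠ "") :
    w ∈ (granted.filter (fun x => !(PySem.Str.strip x == ""))).map pyNorm ↔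
      ∃ x ∈ granted, pyNorm x = w := by
  rw [mem_gn]
  constructor
  · rintro ⟨x, hx, _, rfl⟩; exact ⟨x, hx, rfl⟩
  · rintro ⟨x, hx, rfl⟩
    exact ⟨x, hx, fun h => hw ((pyNorm_eq_empty_iff x).mpr h), rfl⟩

-- A's per-need loop as an `any`
theorem hasScopeLoop_iff (gn : List String) (req : List String) :
    hasScopeLoop gn req = true ↔
      ∃ r ∈ req, pyNorm r ≠ "" ∧
        (pyNorm r ∈ gn ∨ (PySem.Str.isIn ":" (pyNorm r) = true ∧
          (pyFirstSeg (pyNorm r) ++ ":*") ∈ gn)) := by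
  induction req with
  | nil => simp [hasScopeLoop]
  | cons need rest ih =>
    simp only [hasScopeLoop]
    split_ifs with h1 h2 h3 h4 <;>
      simp_all [List.contains_iff_mem] <;> tauto

theorem A_iff (granted required : List String) :
    has_any_scope_py granted required = true ↔ MatchScope granted required := by
  unfold has_any_scope_py MatchScope
  dsimp only
  by_cases hstar : ("*" : String) ∈
      (granted.filter (fun x => !(PySem.Str.strip x == ""))).map pyNorm
  · have h1 : (∃ x ∈ granted, pyNorm x = "*") :=
      (mem_gn_of_ne granted "*" (by decide)).mp hstar
    simp [List.contains_iff_mem, hstar, h1]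
  · have h1 : ¬ (∃ x ∈ granted, pyNorm x = "*") :=
      fun h => hstar ((mem_gn_of_ne granted "*" (by decide)).mpr h)
    simp only [List.contains_iff_mem, hstar, if_false, hasScopeLoop_iff, h1, false_or]
    constructor
    · rintro ⟨r, hr, hne, hcase⟩
      refine ⟨r, hr, hne, ?_⟩
      rcases hcase with hmem | ⟨hc, hmem⟩
      · exact Or.inl ((mem_gn_of_ne granted _ hne).mp hmem)
      · exact Or.inr ⟨hc, (mem_gn_of_ne granted _ (append_star_ne_empty _)).mp hmem⟩
    · rintro ⟨r, hr, hne, hcase⟩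
      refine ⟨r, hr, hne, ?_⟩
      rcases hcase with hmem | ⟨hc, hmem⟩
      · exact Or.inl ((mem_gn_of_ne granted _ hne).mpr hmem)
      · exact Or.inr ⟨hc, (mem_gn_of_ne granted _ (append_star_ne_empty _)).mpr hmem⟩

-- membership in B's two index sets
theorem buildStep_fst (acc : PySem.Set String × PySem.Set String) (x : String) :
    (buildStep acc x).1 =
      if pyNorm x = "" then acc.1 else PySem.Set.add acc.1 (pyNorm x) := by
  unfold buildStep
  dsimp only
  by_cases h0 : pyNorm x = ""
  · simp [h0]
  · cases hb : PySem.Str.isIn ":" (pyNorm x) <;> simp [h0, hb]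

theorem buildStep_snd_skip (acc : PySem.Set String × PySem.Set String) (x : String)
    (h : pyNorm x = "" ∨ PySem.Str.isIn ":" (pyNorm x) = false) :
    (buildStep acc x).2 = acc.2 := by
  unfold buildStep
  dsimp only
  rcases h with h | h
  · simp [h]
  · by_cases h0 : pyNorm x = ""
    · simp [h0]
    · rw [if_neg (by simp [h0]), if_neg (by rw [h]; decide)]

theorem buildStep_snd_add (acc : PySem.Set String × PySem.Set String) (x : String)
    (h0 : ¬ pyNorm x = "") (hb : PySem.Str.isIn ":" (pyNorm x) = true) :
    (buildStep acc x).2 = PySem.Set.add acc.2 (pyFirstSeg (pyNorm x)) := by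
  unfold buildStep
  dsimp only
  rw [if_neg (by simp [h0]), if_pos hb]

theorem foldl_buildStep_fst (req : List String) (acc : PySem.Set String × PySem.Set String)
    (w : String) :
    w ∈ (req.foldl buildStep acc).1 ↔
      w ∈ acc.1 ∨ ∃ r ∈ req, pyNorm r = w ∧ w ≠ "" := by
  induction req generalizing acc with
  | nil => simp
  | cons r rest ih =>
    rw [List.foldl_cons, ih, buildStep_fst]
    split_ifs with h0
    · simp only [List.mem_cons]
      constructor
      · rintro (h | ⟨s, hs, rfl, hne⟩)
        · exact Or.inl h
        · exact Or.inr ⟨s, Or.inr hs, rfl, hne⟩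
      · rintro (h | ⟨s, (rfl | hs), rfl, hne⟩)
        · exact Or.inl h
        · exact absurd h0 hne
        · exact Or.inr ⟨s, hs, rfl, hne⟩
    · simp only [PySem.Set.mem_add, List.mem_cons]
      constructor
      · rintro ((h | rfl) | ⟨s, hs, rfl, hne⟩)
        · exact Or.inl h
        · exact Or.inr ⟨r, Or.inl rfl, rfl, h0⟩
        · exact Or.inr ⟨s, Or.inr hs, rfl, hne⟩
      · rintro (h | ⟨s, (rfl | hs), rfl, hne⟩)
        · exact Or.inl (Or.inl h)
        · exact Or.inl (Or.inr rfl)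
        · exact Or.inr ⟨s, hs, rfl, hne⟩

theorem foldl_buildStep_snd (req : List String) (acc : PySem.Set String × PySem.Set String)
    (p : String) :
    p ∈ (req.foldl buildStep acc).2 ↔
      p ∈ acc.2 ∨ ∃ r ∈ req, pyNorm r ≠ "" ∧
        PySem.Str.isIn ":" (pyNorm r) = true ∧ pyFirstSeg (pyNorm r) = p := by
  induction req generalizing acc with
  | nil => simp
  | cons r rest ih =>
    rw [List.foldl_cons, ih]
    by_cases h0 : pyNorm r = ""
    · rw [buildStep_snd_skip acc r (Or.inl h0)]
      simp only [List.mem_cons]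
      constructor
      · rintro (h | ⟨s, hs, hne, hc, rfl⟩)
        · exact Or.inl h
        · exact Or.inr ⟨s, Or.inr hs, hne, hc, rfl⟩
      · rintro (h | ⟨s, (rfl | hs), hne, hc, rfl⟩)
        · exact Or.inl h
        · exact absurd h0 hne
        · exact Or.inr ⟨s, hs, hne, hc, rfl⟩
    · cases hb : PySem.Str.isIn ":" (pyNorm r) with
      | false =>
        rw [buildStep_snd_skip acc r (Or.inr hb)]
        simp only [List.mem_cons]
        constructor
        · rintro (h | ⟨s, hs, hne, hc, rfl⟩)
          · exact Or.inl h
          · exact Or.inr ⟨s, Or.inr hs, hne, hc, rfl⟩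
        · rintro (h | ⟨s, (rfl | hs), hne, hc, rfl⟩)
          · exact Or.inl h
          · rw [hb] at hc; exact absurd hc (by decide)
          · exact Or.inr ⟨s, hs, hne, hc, rfl⟩
      | true =>
        rw [buildStep_snd_add acc r h0 hb]
        simp only [PySem.Set.mem_add, List.mem_cons]
        constructor
        · rintro ((h | hp) | ⟨s, hs, hne, hc, hp⟩)
          · exact Or.inl h
          · exact Or.inr ⟨r, Or.inl rfl, h0, hb, hp.symm⟩
          · exact Or.inr ⟨s, Or.inr hs, hne, hc, hp⟩
        · rintro (h | ⟨s, (rfl | hs), hne, hc, hp⟩)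
          · exact Or.inl (Or.inl h)
          · exact Or.inl (Or.inr hp.symm)
          · exact Or.inr ⟨s, hs, hne, hc, hp⟩

theorem needs_mem (required : List String) (w : String) :
    w ∈ (buildNeeds required).1 ↔ ∃ r ∈ required, pyNorm r = w ∧ w ≠ "" := by
  unfold buildNeeds
  rw [foldl_buildStep_fst]
  dsimp only
  simp only [List.not_mem_nil, false_or]

theorem prefixes_mem (required : List String) (p : String) :
    p ∈ (buildNeeds required).2 ↔ ∃ r ∈ required, pyNorm r ≠ "" ∧
      PySem.Str.isIn ":" (pyNorm r) = true ∧ pyFirstSeg (pyNorm r) = p := by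
  unfold buildNeeds
  rw [foldl_buildStep_snd]
  dsimp only
  simp only [List.not_mem_nil, false_or]

theorem grantLoop_cons (needs prefixes : PySem.Set String) (x : String) (rest : List String) :
    grantLoop needs prefixes (x :: rest) =
      ((pyNorm x == "*") || PySem.Set.contains needs (pyNorm x) ||
        (PySem.Str.endswith (pyNorm x) ":*" &&
          PySem.Set.contains prefixes (PySem.Str.slice (pyNorm x) none (some (-2)))) ||
        grantLoop needs prefixes rest) := by
  simp only [grantLoop]
  split_ifs with h1 h2 h3 <;> simp_all

theorem grantLoop_iff (needs prefixes : PySem.Set String) (g : List String) :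
    grantLoop needs prefixes g = true ↔
      ∃ x ∈ g, pyNorm x = "*" ∨ pyNorm x ∈ needs ∨
        (PySem.Str.endswith (pyNorm x) ":*" = true ∧
          PySem.Str.slice (pyNorm x) none (some (-2)) ∈ prefixes) := by
  induction g with
  | nil => simp [grantLoop]
  | cons x rest ih =>
    rw [grantLoop_cons]
    simp only [Bool.or_eq_true, Bool.and_eq_true, beq_iff_eq, PySem.Set.contains_iff, ih,
      List.mem_cons]
    constructor
    · rintro (((h | h) | h) | ⟨y, hy, hc⟩)
      · exact ⟨x, Or.inl rfl, Or.inl h⟩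
      · exact ⟨x, Or.inl rfl, Or.inr (Or.inl h)⟩
      · exact ⟨x, Or.inl rfl, Or.inr (Or.inr h)⟩
      · exact ⟨y, Or.inr hy, hc⟩
    · rintro ⟨y, (rfl | hy), hc⟩
      · rcases hc with h | h | h
        · exact Or.inl (Or.inl (Or.inl h))
        · exact Or.inl (Or.inl (Or.inr h))
        · exact Or.inl (Or.inr h)
      · exact Or.inr ⟨y, hy, hc⟩

theorem B_iff (granted required : List String) :
    has_any_scope_py_alt granted required = true ↔ MatchScope granted required := by
  unfold has_any_scope_py_alt
  dsimp only
  rw [grantLoop_iff]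
  have hN := needs_mem required
  have hP := prefixes_mem required
  unfold MatchScope
  constructor
  · rintro ⟨x, hx, hcase⟩
    rcases hcase with hstar | hneed | ⟨hend, hpre⟩
    · exact Or.inl ⟨x, hx, hstar⟩
    · obtain ⟨r, hr, hwr, hne⟩ := (hN _).mp hneed
      exact Or.inr ⟨r, hr, (fun h => hne (hwr.symm.trans h)), Or.inl ⟨x, hx, hwr.symm⟩⟩
    · obtain ⟨q, hq⟩ := (endswith_star_iff _).mp hend
      obtain ⟨r, hr, hne, hc, hseg⟩ := (hP _).mp hpre
      refine Or.inr ⟨r, hr, hne, Or.inr ⟨hc, x, hx, ?_⟩⟩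
      rw [hseg, hq, slice_star]
  · rintro (⟨x, hx, hstar⟩ | ⟨r, hr, hne, hcase⟩)
    · exact ⟨x, hx, Or.inl hstar⟩
    · rcases hcase with ⟨x, hx, hxr⟩ | ⟨hc, x, hx, hxr⟩
      · exact ⟨x, hx, Or.inr (Or.inl ((hN _).mpr ⟨r, hr, hxr.symm, (fun h => hne (hxr.symm.trans h))⟩))⟩
      · refine ⟨x, hx, Or.inr (Or.inr ⟨?_, ?_⟩)⟩
        · rw [hxr]; exact (endswith_star_iff _).mpr ⟨_, rfl⟩
        · rw [hxr, slice_star]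
          exact (hP _).mpr ⟨r, hr, hne, hc, rfl⟩

-- ===== VERDICT (by name: the statement is the Claim_ definition above) =====
theorem has_any_scope_py_spec : Claim_equal_has_any_scope_py := by
  intro granted required _
  unfold Spec_has_any_scope_py
  rw [Bool.eq_iff_iff, A_iff, B_iff]
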